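-- pv_equiv track=rewrite | github.com/DavidSlivka/Semester-work | helper_functions.py | return_path_from_sequence_pairs
-- ===== SOURCE A (Python) =====
-- def return_leaf(neighbours: dict):
--     """
--     return first vertex with degree 1 (has only 1 neighbour)
--     :param neighbours: dictionary of vertices and their neighbours
--     :return:
--     """
--     current = None
--     for vertex in neighbours:
--         if len(neighbours[vertex]) == 1:
--             current = vertex
--             break
--
--     return current
--
-- def return_neighbours_from_pairs(sequence: list):
--     """
--     :param sequence: array of pairs that form a path
--     :return: dictionary of all vertices and their neighbours
--     """
--     neighbours = {}
--     for pair in sequence: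
--         if pair[0] in neighbours:
--             neighbours[pair[0]].append(pair[1])
--         else:
--             neighbours[pair[0]] = [pair[1]]
--
--         if pair[1] in neighbours:
--             neighbours[pair[1]].append(pair[0])
--         else:
--             neighbours[pair[1]] = [pair[0]]
--
--     return neighbours
--
-- def travers(current: int, prev: int, path: list, neighbours: dict):
--     """
--     create a path from dict of neighbours
--     :param current: current vertex
--     :param prev: previous vertex
--     :param path: path from neighbours that is recursively created from one leaf to another
--     :param neighbours: dict of all vertices and their neighbours
--     :return: path from one leaf to another
--     """
--     path.append(current)
--
--     if len(path) == len(neighbours):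
--         return path
--     for vertex in neighbours[current]:
--         if vertex != prev:
--             return travers(vertex, current, path, neighbours)
--
-- def return_path_from_sequence_pairs(sequence: list):
--     """
--     wrapper function
--     :param sequence: array of pairs of vertices
--     :return: array of vertices in order that form hamiltonian circuit
--     """
--     path = None
--     if all(len(pair) == 2 for pair in sequence):
--         neighbours = return_neighbours_from_pairs(sequence)
--         current = return_leaf(neighbours)
--         path = travers(current, current, [], neighbours)
--         path.append(current)
--     return path
-- ===== SOURCE B (Python) =====
-- def return_path_from_sequence_pairs(sequence: list):
--     """
--     wrapper function
--     :param sequence: array of pairs of vertices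
--     :return: array of vertices in order that form hamiltonian circuit
--     """
--     if any(len(pair) != 2 for pair in sequence):
--         return None
--     adj = {}
--     for a, b in sequence:
--         adj.setdefault(a, []).append(b)
--         adj.setdefault(b, []).append(a)
--     leaf = next((v for v, ns in adj.items() if len(ns) == 1), None)
--     if leaf is None:
--         return None
--     path = [leaf]
--     prev, cur = leaf, leaf
--     while len(path) < len(adj):
--         nxt = next((w for w in adj[cur] if w != prev), None)
--         if nxt is None:
--             return None
--         path.append(nxt)
--         prev, cur = cur, nxt
--     path.append(leaf)
--     return path
-- ===== Notes on version B (the rewrite author's own statement) =====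
-- stated objective: idiomatic
-- what changed: The recursive travers is replaced by an iterative prev/current walk in a while loop (so long paths no longer grow the call stack), the adjacency build uses setdefault(...).append(...) instead of four in/append/assign branches, and the leaf is found by a next() scan over dict items instead of a for/break loop over keys.
-- outside the precondition, e.g. on return_path_from_sequence_pairs([[2, 2]]): A returns [None, None], B returns None; on return_path_from_sequence_pairs([[3, 2], [2, 3], [3, 1]]): A returns [1, 3, 2, 1], B returns [1, 3, 2, 1]
import Mathlib
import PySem

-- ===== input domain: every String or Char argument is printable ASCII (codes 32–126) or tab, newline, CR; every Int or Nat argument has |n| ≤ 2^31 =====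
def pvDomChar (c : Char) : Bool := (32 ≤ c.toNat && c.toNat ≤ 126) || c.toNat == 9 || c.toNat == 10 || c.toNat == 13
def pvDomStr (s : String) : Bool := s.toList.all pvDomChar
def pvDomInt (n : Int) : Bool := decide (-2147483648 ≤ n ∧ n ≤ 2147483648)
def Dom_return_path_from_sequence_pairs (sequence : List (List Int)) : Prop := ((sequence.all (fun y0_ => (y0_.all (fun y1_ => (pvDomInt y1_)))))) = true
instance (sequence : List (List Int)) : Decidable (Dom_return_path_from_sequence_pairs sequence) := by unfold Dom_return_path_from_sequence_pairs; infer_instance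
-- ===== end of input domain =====

-- B replaces A's recursive `travers` by an iterative prev/current walk (setdefault-style adjacency build,
-- items-scan for the leaf); return value equivalence only (neither mutates its argument observably).

-- ===== PORT A =====
-- return_neighbours_from_pairs: dict build with the original's in/append/else branches.
-- (the `match` arm for a non-[a,b] pair is unreachable: the wrapper checks len(pair) == 2 first)
def pvNbrsStepA (d : PySem.Dict Int (List Int)) (pair : List Int) : PySem.Dict Int (List Int) :=
  match pair with
  | [a, b] =>
    let d1 := if d.contains a then d.insert a (d.getD a [] ++ [b]) else d.insert a [b]
    if d1.contains b then d1.insert b (d1.getD b [] ++ [a]) else d1.insert b [a]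
  | _ => d

def pvNbrsA (sequence : List (List Int)) : PySem.Dict Int (List Int) :=
  sequence.foldl pvNbrsStepA PySem.Dict.empty

-- return_leaf: first key whose neighbour list has length 1
def pvLeafA (neighbours : PySem.Dict Int (List Int)) : Option Int :=
  neighbours.keys.find? (fun vertex => (neighbours.getD vertex []).length == 1)

-- travers: fuelled structural recursion (the Python recursion returns only when len(path) reaches
-- len(neighbours), so fuel size+1 is never exhausted on inputs where Python returns; Python's
-- fall-through `return None` is the `none` arm)
def pvTraversA (neighbours : PySem.Dict Int (List Int)) :
    Nat → Int → Int → List Int → Option (List Int)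
  | 0, _, _, _ => none
  | fuel + 1, current, prev, path =>
    let path := path ++ [current]
    if path.length == neighbours.size then some path
    else
      match (neighbours.getD current []).find? (fun vertex => vertex != prev) with
      | some v => pvTraversA neighbours fuel v current path
      | none => none

def return_path_from_sequence_pairs (sequence : List (List Int)) : Option (List Int) :=
  if sequence.all (fun pair => pair.length == 2) then
    let neighbours := pvNbrsA sequence
    match pvLeafA neighbours with
    | some current =>
      match pvTraversA neighbours (neighbours.size + 1) current current [] with
      | some path => some (path ++ [current])
      | none => none   -- Python: travers returned None, path.append raises AttributeError (outside Pre_)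
    | none => none     -- Python: neighbours[None] raises KeyError, or returns [None, None] (outside Pre_)
  else none

-- ===== PORT B =====
-- adjacency built with setdefault(…).append(…)  (= modify with default [])
def pvAdjStepB (d : PySem.Dict Int (List Int)) (pair : List Int) : PySem.Dict Int (List Int) :=
  match pair with
  | [a, b] => (d.modify a [] (· ++ [b])).modify b [] (· ++ [a])
  | _ => d

def pvAdjB (sequence : List (List Int)) : PySem.Dict Int (List Int) :=
  sequence.foldl pvAdjStepB PySem.Dict.empty

-- the while-loop walk; fuel size+1 mirrors the loop bound len(path) < len(adj)
def pvWalkB (adj : PySem.Dict Int (List Int)) :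
    Nat → Int → Int → List Int → Option (List Int)
  | 0, _, _, _ => none
  | fuel + 1, prev, cur, path =>
    if path.length < adj.size then
      match (adj.getD cur []).find? (fun w => w != prev) with
      | some nxt => pvWalkB adj fuel cur nxt (path ++ [nxt])
      | none => none
    else some path

def return_path_from_sequence_pairs_alt (sequence : List (List Int)) : Option (List Int) :=
  if sequence.any (fun pair => pair.length != 2) then none
  else
    let adj := pvAdjB sequence
    match ((adj.items.find? (fun kv => kv.2.length == 1)).map (·.1)) with
    | none => none
    | some leaf =>
      match pvWalkB adj (adj.size + 1) leaf leaf [leaf] with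
      | some path => some (path ++ [leaf])
      | none => none

-- ===== PRECONDITION & SPEC =====
-- Pre_ keeps inputs with a malformed (non-length-2) pair (A returns None) and nonempty edge lists forming a
-- single simple path (two vertices of degree 1, the rest degree 2, one connected component); it excludes the
-- other edge lists, on which A usually raises (KeyError on empty/leafless input, AttributeError on a stuck
-- walk) or returns the non-integer list [None, None], though on some degenerate multigraphs A's greedy walk
-- happens to return a value — and there B agrees with A (see claim.json cites).
def pvCompStep (comps : List (List Int)) (a b : Int) : List (List Int) :=
  let ca := (comps.find? (fun c => c.contains a)).getD [a]
  let rest := comps.filter (fun c => !c.contains a)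
  if ca.contains b then rest ++ [ca]
  else
    let cb := (rest.find? (fun c => c.contains b)).getD [b]
    (rest.filter (fun c => !c.contains b)) ++ [ca ++ cb]

def pvComponents (sequence : List (List Int)) : List (List Int) :=
  sequence.foldl (fun cs pair => match pair with | [a, b] => pvCompStep cs a b | _ => cs) []

def Pre_return_path_from_sequence_pairs (sequence : List (List Int)) : Prop :=
  (¬ (sequence.all (fun pair => pair.length == 2) = true)) ∨
  (sequence ≠ [] ∧
    ((PySem.List.dedup sequence.flatten).filter
        (fun v => sequence.flatten.count v == 1)).length = 2 ∧
    (∀ v ∈ PySem.List.dedup sequence.flatten,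
        sequence.flatten.count v = 1 ∨ sequence.flatten.count v = 2) ∧
    (pvComponents sequence).length = 1)
instance (sequence : List (List Int)) : Decidable (Pre_return_path_from_sequence_pairs sequence) := by
  unfold Pre_return_path_from_sequence_pairs; infer_instance

def pvWitness_return_path_from_sequence_pairs : List (List Int) := [[1, 2], [2, 3]]

def Spec_return_path_from_sequence_pairs (sequence : List (List Int)) (out : Option (List Int)) : Prop := out = return_path_from_sequence_pairs_alt sequence
instance (sequence : List (List Int)) (out : Option (List Int)) : Decidable (Spec_return_path_from_sequence_pairs sequence out) := by unfold Spec_return_path_from_sequence_pairs; infer_instance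

-- ===== CLAIM (what is proved, stated in full; the proofs are below) =====
def Claim_equal_return_path_from_sequence_pairs : Prop := ∀ (sequence : List (List Int)), Dom_return_path_from_sequence_pairs sequence → Pre_return_path_from_sequence_pairs sequence → Spec_return_path_from_sequence_pairs sequence (return_path_from_sequence_pairs sequence)

-- ===== LEMMAS AND PROOFS =====

-- one Python-side update `neighbours[a] += [b]` (A's if/in/append/else form vs B's setdefault/modify form)
theorem pv_halfA_getD (d : PySem.Dict Int (List Int)) (a b v : Int) :
    (if d.contains a then d.insert a (d.getD a [] ++ [b]) else d.insert a [b]).getD v []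
      = if v = a then d.getD a [] ++ [b] else d.getD v [] := by
  by_cases h : d.contains a = true
  · simp [h, PySem.Dict.getD_insert]
  · have h' : d.contains a = false := by simpa using h
    simp [h', PySem.Dict.getD_insert, PySem.Dict.getD_of_not_contains d [] h']

theorem pv_halfB_getD (d : PySem.Dict Int (List Int)) (a b v : Int) :
    (d.modify a [] (· ++ [b])).getD v [] = if v = a then d.getD a [] ++ [b] else d.getD v [] := by
  simp [PySem.Dict.getD_modify]

theorem pv_halfA_keys (d : PySem.Dict Int (List Int)) (a b : Int) :
    (if d.contains a then d.insert a (d.getD a [] ++ [b]) else d.insert a [b]).keys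
      = if d.contains a then d.keys else d.keys ++ [a] := by
  by_cases h : d.contains a = true
  · simp [h, PySem.Dict.keys_insert_of_contains d _ h]
  · have h' : d.contains a = false := by simpa using h
    simp [h', PySem.Dict.keys_insert_of_not_contains d _ h']

theorem pv_halfB_keys (d : PySem.Dict Int (List Int)) (a b : Int) :
    (d.modify a [] (· ++ [b])).keys = if d.contains a then d.keys else d.keys ++ [a] := by
  rw [PySem.Dict.keys_modify]
  by_cases h : d.contains a = true
  · simp [h, PySem.Dict.keys_insert_of_contains d _ h]
  · have h' : d.contains a = false := by simpa using h
    simp [h', PySem.Dict.keys_insert_of_not_contains d _ h']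

theorem pv_half_agree (d e : PySem.Dict Int (List Int)) (a b : Int)
    (hg : ∀ v, d.getD v [] = e.getD v []) (hk : d.keys = e.keys) :
    (∀ v, (if d.contains a then d.insert a (d.getD a [] ++ [b]) else d.insert a [b]).getD v []
        = (e.modify a [] (· ++ [b])).getD v []) ∧
      (if d.contains a then d.insert a (d.getD a [] ++ [b]) else d.insert a [b]).keys
        = (e.modify a [] (· ++ [b])).keys := by
  have hc : d.contains a = e.contains a := by
    rw [PySem.Dict.contains_eq_decide_mem_keys, PySem.Dict.contains_eq_decide_mem_keys, hk]
  constructor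
  · intro v
    rw [pv_halfA_getD, pv_halfB_getD, hg v, hg a]
  · rw [pv_halfA_keys, pv_halfB_keys, hk, hc]

theorem pv_step_agree (d e : PySem.Dict Int (List Int)) (pair : List Int)
    (hg : ∀ v, d.getD v [] = e.getD v []) (hk : d.keys = e.keys) :
    (∀ v, (pvNbrsStepA d pair).getD v [] = (pvAdjStepB e pair).getD v []) ∧
      (pvNbrsStepA d pair).keys = (pvAdjStepB e pair).keys := by
  match pair with
  | [] => exact ⟨hg, hk⟩
  | [a] => exact ⟨hg, hk⟩
  | a :: b :: c :: rest => exact ⟨hg, hk⟩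
  | [a, b] =>
    simp only [pvNbrsStepA, pvAdjStepB]
    obtain ⟨hg1, hk1⟩ := pv_half_agree d e a b hg hk
    exact pv_half_agree _ _ b a hg1 hk1

theorem pv_build_agree_aux (l : List (List Int)) :
    ∀ (d e : PySem.Dict Int (List Int)),
      (∀ v, d.getD v [] = e.getD v []) → d.keys = e.keys →
      (∀ v, (l.foldl pvNbrsStepA d).getD v [] = (l.foldl pvAdjStepB e).getD v []) ∧
        (l.foldl pvNbrsStepA d).keys = (l.foldl pvAdjStepB e).keys := by
  induction l with
  | nil => intro d e hg hk; exact ⟨hg, hk⟩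
  | cons p t ih =>
    intro d e hg hk
    obtain ⟨hg1, hk1⟩ := pv_step_agree d e p hg hk
    exact ih _ _ hg1 hk1

theorem pv_build_agree (sequence : List (List Int)) :
    (∀ v : Int, (pvNbrsA sequence).getD v [] = (pvAdjB sequence).getD v []) ∧
      (pvNbrsA sequence).keys = (pvAdjB sequence).keys :=
  pv_build_agree_aux sequence PySem.Dict.empty PySem.Dict.empty (fun _ => rfl) rfl

theorem pv_keys_length_eq_size (d : PySem.Dict Int (List Int)) : d.keys.length = d.size := by
  simp [PySem.Dict.keys, PySem.Dict.size]

theorem pv_size_eq (sequence : List (List Int)) :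
    (pvNbrsA sequence).size = (pvAdjB sequence).size := by
  rw [← pv_keys_length_eq_size, ← pv_keys_length_eq_size, (pv_build_agree sequence).2]

theorem pv_stepB_nodup (d : PySem.Dict Int (List Int)) (pair : List Int)
    (h : d.keys.Nodup) : (pvAdjStepB d pair).keys.Nodup := by
  match pair with
  | [] => exact h
  | [a] => exact h
  | a :: b :: c :: rest => exact h
  | [a, b] =>
    simp only [pvAdjStepB]
    have step : ∀ (e : PySem.Dict Int (List Int)) (x y : Int), e.keys.Nodup →
        (e.modify x [] (· ++ [y])).keys.Nodup := by
      intro e x y he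
      rw [pv_halfB_keys]
      by_cases hc : e.contains x = true
      · simpa [hc] using he
      · have h' : e.contains x = false := by simpa using hc
        have hx : x ∉ e.keys := by
          have := PySem.Dict.contains_eq_decide_mem_keys e x
          rw [h'] at this
          simpa using this.symm
        simp [h', List.nodup_append, he]
        exact fun a ha hax => hx (hax ▸ ha)
    exact step _ b a (step d a b h)

theorem pv_nodup_adjB_aux (l : List (List Int)) :
    ∀ (d : PySem.Dict Int (List Int)), d.keys.Nodup → (l.foldl pvAdjStepB d).keys.Nodup := by
  induction l with
  | nil => intro d h; exact h
  | cons p t ih => intro d h; exact ih _ (pv_stepB_nodup d p h)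

theorem pv_nodup_adjB (sequence : List (List Int)) : (pvAdjB sequence).keys.Nodup :=
  pv_nodup_adjB_aux sequence PySem.Dict.empty (by decide)

theorem pv_leaf_eq (sequence : List (List Int)) :
    pvLeafA (pvNbrsA sequence) =
      ((pvAdjB sequence).items.find? (fun kv => kv.2.length == 1)).map (·.1) := by
  obtain ⟨hg, hk⟩ := pv_build_agree sequence
  unfold pvLeafA
  have hpred : (fun vertex => ((pvNbrsA sequence).getD vertex []).length == 1)
      = (fun vertex => ((pvAdjB sequence).getD vertex []).length == 1) :=
    funext (fun v => by rw [hg v])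
  rw [hpred, hk, PySem.Dict.items_eq_map_keys _ (pv_nodup_adjB sequence) [],
    List.find?_map, Option.map_map]
  simp only [Function.comp_def, Option.map_id']

theorem pv_walk_eq (sequence : List (List Int)) :
    ∀ (fuel : Nat) (current prev : Int) (path : List Int),
      (path ++ [current]).length ≤ (pvAdjB sequence).size →
      pvTraversA (pvNbrsA sequence) fuel current prev path =
        pvWalkB (pvAdjB sequence) fuel prev current (path ++ [current]) := by
  obtain ⟨hg, _⟩ := pv_build_agree sequence
  have hsz := pv_size_eq sequence
  intro fuel
  induction fuel with
  | zero => intro current prev path _; rfl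
  | succ f ih =>
    intro current prev path hlen
    simp only [pvTraversA, pvWalkB]
    by_cases hEq : (path ++ [current]).length = (pvAdjB sequence).size
    · simp [hsz, hEq]
    · have hlt : (path ++ [current]).length < (pvAdjB sequence).size :=
        lt_of_le_of_ne hlen hEq
      have hbeq : ((path ++ [current]).length == (pvNbrsA sequence).size) = false := by
        rw [hsz]
        exact beq_eq_false_iff_ne.mpr hEq
      rw [hg current]
      simp only [hbeq, if_pos hlt, Bool.false_eq_true, if_false]
      cases hf : ((pvAdjB sequence).getD current []).find? (fun w => w != prev) with
      | none => rfl
      | some v =>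
        have hlen' : ((path ++ [current]) ++ [v]).length ≤ (pvAdjB sequence).size := by
          simp at hlt ⊢; omega
        exact ih v current (path ++ [current]) hlen'

theorem pv_any_ne_eq (l : List (List Int)) :
    (l.any fun pair => pair.length != 2) = !l.all fun pair => pair.length == 2 := by
  induction l with
  | nil => rfl
  | cons h t ih =>
    simp only [bne] at ih
    simp only [List.any_cons, List.all_cons, bne, ih, Bool.not_and]

theorem pv_ports_eq (sequence : List (List Int)) :
    return_path_from_sequence_pairs sequence = return_path_from_sequence_pairs_alt sequence := by
  unfold return_path_from_sequence_pairs return_path_from_sequence_pairs_alt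
  rw [pv_any_ne_eq]
  by_cases hall : (sequence.all fun pair => pair.length == 2) = true
  · simp only [hall, if_true, Bool.not_true, Bool.false_eq_true, if_false]
    rw [pv_leaf_eq]
    cases hf : (pvAdjB sequence).items.find? (fun kv => kv.2.length == 1) with
    | none => rfl
    | some kv =>
      simp only [Option.map_some]
      have hmem : kv ∈ (pvAdjB sequence).items := List.mem_of_find?_eq_some hf
      have hpos : 1 ≤ (pvAdjB sequence).size := by
        have : (pvAdjB sequence).items ≠ [] := by
          intro hnil; rw [hnil] at hmem; exact (List.not_mem_nil) hmem
        have : 0 < (pvAdjB sequence).items.length := List.length_pos_iff.mpr this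
        simpa [PySem.Dict.size] using this
      have hw := pv_walk_eq sequence ((pvAdjB sequence).size + 1) kv.1 kv.1 []
        (by simpa using hpos)
      rw [pv_size_eq, hw]
      rfl
  · have h' : (sequence.all fun pair => pair.length == 2) = false := by simpa using hall
    simp [h']

-- ===== VERDICT (by name: the statement is the Claim_ definition above) =====
theorem return_path_from_sequence_pairs_spec : Claim_equal_return_path_from_sequence_pairs := by
  intro sequence _ _
  unfold Spec_return_path_from_sequence_pairs
  exact pv_ports_eq sequence
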